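-- pv_equiv track=rewrite | github.com/krzysztofkobra/matura_informatyka_rozwiazania_python | 202406/2024_06/2cyfry.py | liczba_nieujemna
-- ===== SOURCE A (Python) =====
-- def liczba_nieujemna(n):
--     b = 1
--     c = 0
--     licznik = 0
--     while n > 0:
--         a = n % 10
--         n = n // 10
--         if(a % 2 == 0):
--             c = c + b * (a // 2)
--         else:
--             c = c + b
--             licznik = licznik + 1
--         b = b * 10
--     return (f"wartość c: {c}, liczba wykonań: {licznik}")
-- ===== SOURCE B (Python) =====
-- def liczba_nieujemna(n):
--     c = 0
--     licznik = 0
--     if n > 0: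
--         for ch in str(n):
--             d = ord(ch) - 48
--             if d % 2 == 0:
--                 c = 10 * c + d // 2
--             else:
--                 c = 10 * c + 1
--                 licznik += 1
--     return (f"wartość c: {c}, liczba wykonań: {licznik}")
-- ===== Notes on version B (the rewrite author's own statement) =====
-- stated objective: alternative
-- what changed: B reads the digits MSB-first from the decimal string representation with a single Horner-style fold, instead of A's LSB-first extraction via mod/floordiv with an explicitly maintained power-of-ten weight b.
import Mathlib
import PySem

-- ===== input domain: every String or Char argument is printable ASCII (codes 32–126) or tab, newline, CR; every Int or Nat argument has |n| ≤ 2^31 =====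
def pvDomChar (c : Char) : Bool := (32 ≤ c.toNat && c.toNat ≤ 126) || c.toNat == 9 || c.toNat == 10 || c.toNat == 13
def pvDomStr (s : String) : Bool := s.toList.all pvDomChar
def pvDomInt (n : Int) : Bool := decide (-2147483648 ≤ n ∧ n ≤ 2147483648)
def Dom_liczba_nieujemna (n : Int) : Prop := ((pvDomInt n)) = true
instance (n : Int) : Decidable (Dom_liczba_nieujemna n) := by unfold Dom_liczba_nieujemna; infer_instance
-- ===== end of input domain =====

-- B reads the digits MSB-first from str(n) with a Horner-style fold instead of A's
-- LSB-first %10-//10 extraction with a power-of-ten weight; equivalence of the return value.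

-- ===== PORT A =====
-- the while-loop of A, state (n, b, c, licznik)
def pvALoop (n b c licznik : Int) : Int × Int :=
  if h : n > 0 then
    let a := PySem.Int.mod n 10
    let n' := PySem.Int.floordiv n 10
    if PySem.Int.mod a 2 == 0 then
      pvALoop n' (b * 10) (c + b * PySem.Int.floordiv a 2) licznik
    else
      pvALoop n' (b * 10) (c + b) (licznik + 1)
  else (c, licznik)
termination_by n.toNat
decreasing_by
  all_goals
    show (PySem.Int.floordiv n 10).toNat < n.toNat
    rw [PySem.Int.floordiv_eq_ediv_of_pos (by norm_num)]
    omega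

def liczba_nieujemna (n : Int) : String :=
  let r := pvALoop n 1 0 0
  "wartość c: " ++ PySem.Int.toStr r.1 ++ ", liczba wykonań: " ++ PySem.Int.toStr r.2

-- ===== PORT B =====
-- one loop iteration of Source B: d = ord(ch) - 48; Horner update
def pvBStep (st : Int × Int) (ch : Char) : Int × Int :=
  if PySem.Int.mod ((ch.toNat : Int) - 48) 2 == 0 then
    (10 * st.1 + PySem.Int.floordiv ((ch.toNat : Int) - 48) 2, st.2)
  else (10 * st.1 + 1, st.2 + 1)

def liczba_nieujemna_alt (n : Int) : String :=
  let r := if n > 0 then (PySem.Int.toStr n).toList.foldl pvBStep (0, 0) else (0, 0)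
  "wartość c: " ++ PySem.Int.toStr r.1 ++ ", liczba wykonań: " ++ PySem.Int.toStr r.2

-- ===== PRECONDITION & SPEC =====
def Spec_liczba_nieujemna (n : Int) (out : String) : Prop := out = liczba_nieujemna_alt n
instance (n : Int) (out : String) : Decidable (Spec_liczba_nieujemna n out) := by unfold Spec_liczba_nieujemna; infer_instance

-- ===== CLAIM (what is proved, stated in full; the proofs are below) =====
def Claim_equal_liczba_nieujemna : Prop := ∀ (n : Int), Dom_liczba_nieujemna n → Spec_liczba_nieujemna n (liczba_nieujemna n)

-- ===== LEMMAS AND PROOFS =====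

-- mapped value of one digit: d/2 if even, 1 if odd
def pvG (d : Nat) : Int := if d % 2 = 0 then (d / 2 : Nat) else 1

-- LSB-first value and odd-digit count of m
def pvV (m : Nat) : Int :=
  if m = 0 then 0 else pvG (m % 10) + 10 * pvV (m / 10)
decreasing_by exact Nat.div_lt_self (by omega) (by omega)

def pvL (m : Nat) : Int :=
  if m = 0 then 0 else (if m % 10 % 2 = 0 then 0 else 1) + pvL (m / 10)
decreasing_by exact Nat.div_lt_self (by omega) (by omega)

-- MSB-first digit characters of m (matches Nat.toDigitsCore's output)
def pvDigs (m : Nat) : List Char :=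
  if m / 10 = 0 then [Nat.digitChar (m % 10)]
  else pvDigs (m / 10) ++ [Nat.digitChar (m % 10)]
decreasing_by exact Nat.div_lt_self (by omega) (by omega)

lemma pvALoop_nonpos (n b c l : Int) (h : ¬ n > 0) : pvALoop n b c l = (c, l) := by
  unfold pvALoop; rw [dif_neg h]

lemma pvALoop_eq (m : Nat) : ∀ (b c l : Int),
    pvALoop (m : Int) b c l = (c + b * pvV m, l + pvL m) := by
  induction m using Nat.strong_induction_on with
  | _ m ih =>
    intro b c l
    have hV0 : pvV 0 = 0 := by rw [pvV, if_pos rfl]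
    have hL0 : pvL 0 = 0 := by rw [pvL, if_pos rfl]
    by_cases hm : m = 0
    · subst hm
      rw [hV0, hL0, pvALoop_nonpos _ _ _ _ (by norm_num)]
      norm_num
    · unfold pvALoop
      have hpos : ((m : Int) > 0) := by omega
      have r10m : ∀ a : Int, PySem.Int.mod a 10 = a % 10 := fun a =>
        PySem.Int.mod_eq_emod_of_pos (by norm_num)
      have r10d : ∀ a : Int, PySem.Int.floordiv a 10 = a / 10 := fun a =>
        PySem.Int.floordiv_eq_ediv_of_pos (by norm_num)
      have r2m : ∀ a : Int, PySem.Int.mod a 2 = a % 2 := fun a =>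
        PySem.Int.mod_eq_emod_of_pos (by norm_num)
      have r2d : ∀ a : Int, PySem.Int.floordiv a 2 = a / 2 := fun a =>
        PySem.Int.floordiv_eq_ediv_of_pos (by norm_num)
      have e1 : ((m : Int)) % 10 = ((m % 10 : Nat) : Int) := by push_cast; ring
      have e2 : ((m : Int)) / 10 = ((m / 10 : Nat) : Int) := by push_cast; ring
      rw [dif_pos hpos]
      simp only [r10m, r10d, r2m, r2d, e1, e2]
      have hlt : m / 10 < m := Nat.div_lt_self (by omega) (by omega)
      rw [pvV, pvL, if_neg hm, if_neg hm]
      by_cases he : m % 10 % 2 = 0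
      · have hb : (((m % 10 : Nat) : Int) % 2 == 0) = true := by
          simp only [beq_iff_eq]; omega
        rw [if_pos hb, ih (m / 10) hlt]
        have e3 : ((m % 10 : Nat) : Int) / 2 = ((m % 10 / 2 : Nat) : Int) := by push_cast; ring
        rw [e3]
        simp only [pvG, if_pos he, Prod.mk.injEq]
        constructor
        · ring
        · omega
      · have hb : ¬ ((((m % 10 : Nat) : Int) % 2 == 0) = true) := by
          simp only [beq_iff_eq]; omega
        rw [if_neg hb, ih (m / 10) hlt]
        simp only [pvG, if_neg he, Prod.mk.injEq]
        constructor
        · ring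
        · ring

lemma pv_digitChar_toNat (d : Nat) (h : d < 10) : (Nat.digitChar d).toNat = 48 + d := by
  interval_cases d <;> decide

lemma pvBStep_digit (st : Int × Int) (d : Nat) (h : d < 10) :
    pvBStep st (Nat.digitChar d) = (10 * st.1 + pvG d, st.2 + if d % 2 = 0 then 0 else 1) := by
  unfold pvBStep pvG
  rw [pv_digitChar_toNat d h]
  have hd : ((48 + d : Nat) : Int) - 48 = ((d : Nat) : Int) := by push_cast; ring
  rw [hd, PySem.Int.mod_eq_emod_of_pos (by norm_num : (0:Int) < 2),
    PySem.Int.floordiv_eq_ediv_of_pos (by norm_num : (0:Int) < 2)]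
  by_cases he : d % 2 = 0
  · have hb : (((d : Nat) : Int) % 2 == 0) = true := by simp only [beq_iff_eq]; omega
    rw [if_pos hb]
    simp only [if_pos he]
    have e3 : ((d : Nat) : Int) / 2 = ((d / 2 : Nat) : Int) := by push_cast; ring
    rw [e3]
    norm_num
  · have hb : ¬ ((((d : Nat) : Int) % 2 == 0) = true) := by simp only [beq_iff_eq]; omega
    rw [if_neg hb]
    simp only [if_neg he]

lemma pvFold_digs (m : Nat) : ∀ (st : Int × Int),
    (pvDigs m).foldl pvBStep st = (st.1 * 10 ^ (pvDigs m).length + pvV m, st.2 + pvL m) := by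
  induction m using Nat.strong_induction_on with
  | _ m ih =>
    intro st
    rw [pvDigs]
    have hm10 : m % 10 < 10 := Nat.mod_lt _ (by omega)
    by_cases h0 : m / 10 = 0
    · have hmm : m % 10 = m := by omega
      rw [if_pos h0]
      simp only [List.foldl_cons, List.foldl_nil, List.length_singleton]
      rw [pvBStep_digit st (m % 10) hm10]
      have hV0 : pvV 0 = 0 := by rw [pvV, if_pos rfl]
      have hL0 : pvL 0 = 0 := by rw [pvL, if_pos rfl]
      by_cases hz : m = 0
      · subst hz
        simp only [Nat.zero_mod, hV0, hL0, pvG, Prod.mk.injEq]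
        norm_num
        ring
      · have hV : pvV m = pvG (m % 10) + 10 * pvV (m / 10) := by
          rw [pvV, if_neg hz]
        have hL : pvL m = (if m % 10 % 2 = 0 then 0 else 1) + pvL (m / 10) := by
          rw [pvL, if_neg hz]
        rw [hV, hL, h0, hV0, hL0, Prod.mk.injEq]
        constructor
        · ring
        · ring
    · rw [if_neg h0]
      have hlt : m / 10 < m := Nat.div_lt_self (by omega) (by omega)
      rw [List.foldl_append, ih (m / 10) hlt st]
      simp only [List.foldl_cons, List.foldl_nil]
      rw [pvBStep_digit _ (m % 10) hm10]
      have hz : m ≠ 0 := by omega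
      simp only [Prod.mk.injEq]
      have hV : pvV m = pvG (m % 10) + 10 * pvV (m / 10) := by
        rw [pvV, if_neg hz]
      have hL : pvL m = (if m % 10 % 2 = 0 then 0 else 1) + pvL (m / 10) := by
        rw [pvL, if_neg hz]
      rw [hV, hL, List.length_append, List.length_singleton, pow_succ]
      constructor
      · ring
      · ring

lemma pv_toDigitsCore (fuel : Nat) : ∀ (m : Nat) (ds : List Char), m < fuel →
    Nat.toDigitsCore 10 fuel m ds = pvDigs m ++ ds := by
  induction fuel with
  | zero => intro m ds h; omega
  | succ fuel ih =>
    intro m ds h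
    rw [Nat.toDigitsCore, pvDigs]
    by_cases h0 : m / 10 = 0
    · simp [h0]
    · rw [if_neg h0, if_neg h0]
      have hlt : m / 10 < fuel := by
        have h1 : m / 10 < m := Nat.div_lt_self (by omega) (by omega)
        omega
      rw [ih (m / 10) _ hlt]
      simp

lemma pv_toChars_pos (n : Int) (h : n > 0) :
    (PySem.Int.toStr n).toList = pvDigs n.toNat := by
  rw [PySem.Int.toList_toStr]
  unfold PySem.Int.toChars
  rw [if_neg (by omega)]
  unfold Nat.toDigits
  rw [pv_toDigitsCore (n.toNat + 1) n.toNat [] (by omega)]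
  simp

-- ===== VERDICT (by name: the statement is the Claim_ definition above) =====
theorem liczba_nieujemna_spec : Claim_equal_liczba_nieujemna := by
  intro n _
  unfold Spec_liczba_nieujemna liczba_nieujemna liczba_nieujemna_alt
  by_cases h : n > 0
  · have hn : n = ((n.toNat : Nat) : Int) := by omega
    rw [if_pos h, pv_toChars_pos n h, pvFold_digs n.toNat (0, 0)]
    conv_lhs => rw [hn]
    rw [pvALoop_eq n.toNat 1 0 0]
    norm_num
  · rw [if_neg h, pvALoop_nonpos n 1 0 0 h]
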